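-- pv_equiv track=rewrite | github.com/uucokgis/hermes-agent | hermes_cli/meridian_support.py | _collect_focus_matches
-- ===== SOURCE A (Python) =====
-- FOCUS_TOPICS: tuple[tuple[str, tuple[str, ...]], ...] = (
--     ("Drawing widget", ("drawing", "geometry", "edit-operations", "editor")),
--     ("Attribute table", ("attribute", "table")),
--     ("Routing / CSV", ("route", "routing", "csv", "upload")),
--     ("Layer visibility", ("layer", "visibility")),
-- )
--
-- def _collect_focus_matches(queue_map: dict[str, list[str]]) -> list[dict[str, str]]:
--     focus_items: list[dict[str, str]] = []
--     lower_map = {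
--         queue: [(name, name.lower()) for name in names]
--         for queue, names in queue_map.items()
--     }
--     for label, keywords in FOCUS_TOPICS:
--         matches: list[str] = []
--         seen: set[str] = set()
--         for queue in ("review", "in_progress", "ready", "backlog", "done", "debt"):
--             for raw_name, lowered in lower_map.get(queue, []):
--                 if not any(keyword in lowered for keyword in keywords):
--                     continue
--                 entry = f"{queue}: {raw_name}"
--                 if entry in seen:
--                     continue
--                 seen.add(entry)
--                 matches.append(entry)
--                 if len(matches) >= 3:
--                     break
--             if len(matches) >= 3:
--                 break
--         if matches:
--             focus_items.append({"label": label, "items": " | ".join(matches)})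
--     return focus_items
-- ===== SOURCE B (Python) =====
-- FOCUS_TOPICS: tuple[tuple[str, tuple[str, ...]], ...] = (
--     ("Drawing widget", ("drawing", "geometry", "edit-operations", "editor")),
--     ("Attribute table", ("attribute", "table")),
--     ("Routing / CSV", ("route", "routing", "csv", "upload")),
--     ("Layer visibility", ("layer", "visibility")),
-- )
--
-- _QUEUE_ORDER = ("review", "in_progress", "ready", "backlog", "done", "debt")
--
--
-- def _topic_row(queue_map: dict[str, list[str]], label: str, keywords: tuple[str, ...]):
--     candidates = [
--         f"{queue}: {name}"
--         for queue in _QUEUE_ORDER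
--         for name in queue_map.get(queue, [])
--         if any(keyword in name.lower() for keyword in keywords)
--     ]
--     matches = list(dict.fromkeys(candidates))[:3]
--     if not matches:
--         return None
--     return {"label": label, "items": " | ".join(matches)}
--
--
-- def _collect_focus_matches(queue_map: dict[str, list[str]]) -> list[dict[str, str]]:
--     rows = (_topic_row(queue_map, label, keywords) for label, keywords in FOCUS_TOPICS)
--     return [row for row in rows if row is not None]
-- ===== Notes on version B (the rewrite author's own statement) =====
-- stated objective: simpler
-- what changed: Replaces the stateful nested loops with seen-set, cap counter and double break (plus a precomputed lower_map of (name, name.lower()) pairs) by a per-topic declarative pipeline: one comprehension collecting all matching entries in queue order, then dict.fromkeys ordered dedup and a [:3] slice, emitted via a filtered generator.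
import Mathlib
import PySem

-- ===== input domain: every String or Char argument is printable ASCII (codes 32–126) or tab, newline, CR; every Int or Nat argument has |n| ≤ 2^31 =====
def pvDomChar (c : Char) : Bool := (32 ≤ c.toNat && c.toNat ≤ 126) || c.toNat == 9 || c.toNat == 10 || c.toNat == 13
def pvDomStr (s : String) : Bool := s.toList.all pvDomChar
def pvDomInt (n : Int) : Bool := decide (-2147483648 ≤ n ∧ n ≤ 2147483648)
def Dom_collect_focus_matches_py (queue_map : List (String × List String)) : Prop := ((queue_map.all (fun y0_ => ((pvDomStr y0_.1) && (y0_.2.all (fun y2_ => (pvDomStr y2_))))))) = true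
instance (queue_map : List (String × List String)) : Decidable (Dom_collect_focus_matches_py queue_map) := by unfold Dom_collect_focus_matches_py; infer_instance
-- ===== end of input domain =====

-- B replaces A's stateful nested loops (seen-set, cap counter, double break, precomputed lower_map)
-- by a per-topic pipeline: collect all matching entries in queue order, ordered-dedup, take 3 (objective: simpler).

-- FOCUS_TOPICS and the queue iteration order, shared module-level constants
def pvFocusTopics : List (String × List String) :=
  [("Drawing widget", ["drawing", "geometry", "edit-operations", "editor"]),
   ("Attribute table", ["attribute", "table"]),
   ("Routing / CSV", ["route", "routing", "csv", "upload"]),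
   ("Layer visibility", ["layer", "visibility"])]

def pvQueueOrder : List String := ["review", "in_progress", "ready", "backlog", "done", "debt"]

-- the Python dict argument, decoded as a PySem.Dict (shared input decoding, not algorithm)
def pvDict0 (queue_map : List (String × List String)) : PySem.Dict String (List String) :=
  queue_map.foldl (fun d p => d.insert p.1 p.2) PySem.Dict.empty

-- ===== PORT A =====
-- lower_map = {queue: [(name, name.lower()) for name in names] for queue, names in queue_map.items()}
def pvLowerMap (queue_map : List (String × List String)) : PySem.Dict String (List (String × String)) :=
  (pvDict0 queue_map).items.foldl
    (fun d p => d.insert p.1 (p.2.map (fun n => (n, PySem.Str.lower n)))) PySem.Dict.empty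

-- inner 'for raw_name, lowered in lower_map.get(queue, []):' loop, with its two continues and break
def pvInnerA (queue : String) (kws : List String) :
    List (String × String) → List String → PySem.Set String → List String × PySem.Set String
  | [], ms, seen => (ms, seen)
  | (raw, lowered) :: rest, ms, seen =>
    if !(kws.any (fun kw => PySem.Str.isIn kw lowered)) then
      pvInnerA queue kws rest ms seen
    else
      let entry := queue ++ ": " ++ raw
      if PySem.Set.contains seen entry then
        pvInnerA queue kws rest ms seen
      else
        let ms' := ms ++ [entry]
        let seen' := PySem.Set.add seen entry
        if 3 ≤ ms'.length then (ms', seen')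
        else pvInnerA queue kws rest ms' seen'

-- outer 'for queue in (...)' loop with its break on len(matches) >= 3
def pvOuterA (lower_map : PySem.Dict String (List (String × String))) (kws : List String) :
    List String → List String → PySem.Set String → List String
  | [], ms, _ => ms
  | q :: qs, ms, seen =>
    match pvInnerA q kws (lower_map.getD q []) ms seen with
    | (m, s) => if 3 ≤ m.length then m else pvOuterA lower_map kws qs m s

def collect_focus_matches_py (queue_map : List (String × List String)) : List (List (String × String)) :=
  pvFocusTopics.foldl
    (fun acc t =>
      let ms := pvOuterA (pvLowerMap queue_map) t.2 pvQueueOrder [] PySem.Set.empty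
      if ms ≠ [] then
        acc ++ [[("label", t.1), ("items", PySem.Str.join " | " ms)]]
      else acc) []

-- ===== PORT B =====
-- one topic: candidates comprehension, dict.fromkeys dedup, [:3] slice
def pvTopicRowB (dict0 : PySem.Dict String (List String)) (label : String) (kws : List String) :
    Option (List (String × String)) :=
  let candidates := pvQueueOrder.flatMap (fun q =>
    ((dict0.getD q []).filter (fun n => kws.any (fun kw => PySem.Str.isIn kw (PySem.Str.lower n)))).map
      (fun n => q ++ ": " ++ n))
  let ms := (PySem.List.dedup candidates).take 3
  if ms = [] then none else some [("label", label), ("items", PySem.Str.join " | " ms)]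

def collect_focus_matches_py_alt (queue_map : List (String × List String)) : List (List (String × String)) :=
  pvFocusTopics.filterMap (fun t => pvTopicRowB (pvDict0 queue_map) t.1 t.2)

-- ===== PRECONDITION & SPEC =====
def Spec_collect_focus_matches_py (queue_map : List (String × List String)) (out : List (List (String × String))) : Prop := out = collect_focus_matches_py_alt queue_map
instance (queue_map : List (String × List String)) (out : List (List (String × String))) : Decidable (Spec_collect_focus_matches_py queue_map out) := by unfold Spec_collect_focus_matches_py; infer_instance

-- ===== CLAIM (what is proved, stated in full; the proofs are below) =====
def Claim_equal_collect_focus_matches_py : Prop := ∀ (queue_map : List (String × List String)), Dom_collect_focus_matches_py queue_map → Spec_collect_focus_matches_py queue_map (collect_focus_matches_py queue_map)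

-- ===== LEMMAS AND PROOFS =====

-- generic absorption loop: add each unseen entry until 3 are collected, then stop
def pvAbsorb : List String → List String → PySem.Set String → List String × PySem.Set String
  | [], m, s => (m, s)
  | e :: es, m, s =>
    if PySem.Set.contains s e then pvAbsorb es m s
    else if 3 ≤ (m ++ [e]).length then (m ++ [e], PySem.Set.add s e)
    else pvAbsorb es (m ++ [e]) (PySem.Set.add s e)

lemma pvInnerA_eq_absorb (q : String) (kws : List String) :
    ∀ (pairs : List (String × String)) (m : List String) (s : PySem.Set String),
      pvInnerA q kws pairs m s =
        pvAbsorb ((pairs.filter (fun p => kws.any (fun kw => PySem.Str.isIn kw p.2))).map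
          (fun p => q ++ ": " ++ p.1)) m s := by
  intro pairs
  induction pairs with
  | nil => intro m s; rfl
  | cons p rest ih =>
    intro m s
    obtain ⟨raw, lo⟩ := p
    cases hm : (kws.any (fun kw => PySem.Str.isIn kw lo)) with
    | true =>
      have hf : List.filter (fun p => kws.any fun kw => PySem.Str.isIn kw p.2) ((raw, lo) :: rest)
          = (raw, lo) :: List.filter (fun p => kws.any fun kw => PySem.Str.isIn kw p.2) rest :=
        List.filter_cons_of_pos hm
      rw [hf, List.map_cons]
      simp only [pvInnerA, pvAbsorb, hm, Bool.not_true, Bool.false_eq_true, if_false, ih]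
    | false =>
      have hf : List.filter (fun p => kws.any fun kw => PySem.Str.isIn kw p.2) ((raw, lo) :: rest)
          = List.filter (fun p => kws.any fun kw => PySem.Str.isIn kw p.2) rest :=
        List.filter_cons_of_neg (by simpa using hm)
      rw [hf]
      simp only [pvInnerA, hm, Bool.not_false, if_true, ih]

lemma pvAbsorb_diag : ∀ (xs : List String) (s : List String),
    (pvAbsorb xs s s).2 = (pvAbsorb xs s s).1 := by
  intro xs
  induction xs with
  | nil => intro s; rfl
  | cons e es ih =>
    intro s
    by_cases hc : e ∈ s
    · simp [pvAbsorb, hc, ih]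
    · have hadd : PySem.Set.add s e = s ++ [e] := by simp [PySem.Set.add, hc]
      by_cases h3 : 2 ≤ s.length
      · simp [pvAbsorb, hc, h3]
      · simp [pvAbsorb, hc, h3, ih]

lemma pvAbsorb_append (xs ys : List String) :
    ∀ (m : List String) (s : PySem.Set String), m.length < 3 →
      pvAbsorb (xs ++ ys) m s =
        (if (pvAbsorb xs m s).1.length < 3 then
          pvAbsorb ys (pvAbsorb xs m s).1 (pvAbsorb xs m s).2
        else pvAbsorb xs m s) := by
  induction xs with
  | nil => intro m s h; simp [pvAbsorb, h]
  | cons e es ih =>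
    intro m s h
    by_cases hc : e ∈ s
    · simp [pvAbsorb, hc, ih _ _ h]
    · by_cases h3 : 2 ≤ m.length
      · have hlen : ¬ (m ++ [e]).length < 3 := by
          simp only [List.length_append, List.length_singleton]; omega
        simp [pvAbsorb, hc, h3]
      · have hlt : (m ++ [e]).length < 3 := by
          simp only [List.length_append, List.length_singleton]; omega
        simp [pvAbsorb, hc, h3, ih _ _ hlt]

lemma pvAbsorb_fst : ∀ (xs : List String) (s : List String), s.length < 3 →
    (pvAbsorb xs s s).1 = (PySem.Set.update s xs).take 3 := by
  intro xs
  induction xs with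
  | nil =>
    intro s h
    simp [pvAbsorb, PySem.Set.update, List.take_of_length_le (Nat.le_of_lt h)]
  | cons e es ih =>
    intro s h
    by_cases hc : e ∈ s
    · have hupd : PySem.Set.update s (e :: es) = PySem.Set.update s es := by
        simp [PySem.Set.update, PySem.Set.add, hc]
      simp [pvAbsorb, hc, hupd, ih _ h]
    · have hadd : PySem.Set.add s e = s ++ [e] := by simp [PySem.Set.add, hc]
      have hupd : PySem.Set.update s (e :: es) = PySem.Set.update (s ++ [e]) es := by
        simp [PySem.Set.update, hadd]
      by_cases h3 : 2 ≤ s.length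
      · have hlen : (s ++ [e]).length = 3 := by
          simp only [List.length_append, List.length_singleton]; omega
        have hpre : (PySem.Set.update (s ++ [e]) es).take 3 = s ++ [e] := by
          rw [PySem.Set.update_eq_append_filter, ← hlen, List.take_left]
        simp [pvAbsorb, hc, h3, hupd, hpre]
      · have hlt : (s ++ [e]).length < 3 := by
          simp only [List.length_append, List.length_singleton]; omega
        simp [pvAbsorb, hc, h3, hupd, ih _ hlt]

lemma pvOuterA_eq_absorb (lm : PySem.Dict String (List (String × String))) (kws : List String) :
    ∀ (qs : List String) (m : List String), m.length < 3 →
      pvOuterA lm kws qs m m =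
        (pvAbsorb (qs.flatMap (fun q =>
          ((lm.getD q []).filter (fun p => kws.any (fun kw => PySem.Str.isIn kw p.2))).map
            (fun p => q ++ ": " ++ p.1))) m m).1 := by
  intro qs
  induction qs with
  | nil => intro m h; simp [pvOuterA, pvAbsorb]
  | cons q qs ih =>
    intro m h
    rw [List.flatMap_cons, pvAbsorb_append _ _ _ _ h]
    set E := (((lm.getD q []).filter
      (fun p => kws.any (fun kw => PySem.Str.isIn kw p.2))).map (fun p => q ++ ": " ++ p.1)) with hE
    have hdiag := pvAbsorb_diag E m
    show (match pvInnerA q kws (lm.getD q []) m m with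
      | (m1, s1) => if 3 ≤ m1.length then m1 else pvOuterA lm kws qs m1 s1) = _
    rw [pvInnerA_eq_absorb, ← hE]
    cases hP : pvAbsorb E m m with
    | mk m1 s1 =>
      have hs1 : s1 = m1 := by
        have hd := pvAbsorb_diag E m
        rw [hP] at hd
        exact hd
      dsimp only
      by_cases hlt : m1.length < 3
      · rw [if_pos hlt, if_neg (by omega), hs1, ih _ hlt]
      · rw [if_neg hlt, if_pos (by omega)]

-- relating A's lower_map to the plain dict: get? commutes with mapping the values
lemma pvGet?_foldl_insert_map {κ ν μ : Type} [BEq κ] [LawfulBEq κ] [DecidableEq κ] (g : ν → μ) :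
    ∀ (l : List (κ × ν)) (d : PySem.Dict κ ν) (d' : PySem.Dict κ μ),
      (∀ k, d'.get? k = (d.get? k).map g) →
      ∀ k, (l.foldl (fun a p => a.insert p.1 (g p.2)) d').get? k =
        ((l.foldl (fun a p => a.insert p.1 p.2) d).get? k).map g := by
  intro l
  induction l with
  | nil => intro d d' h k; simpa using h k
  | cons p rest ih =>
    intro d d' h k
    simp only [List.foldl_cons]
    apply ih
    intro k'
    by_cases hk : k' = p.1
    · subst hk; simp [PySem.Dict.get?_insert_self]
    · rw [PySem.Dict.get?_insert_of_ne _ _ hk, PySem.Dict.get?_insert_of_ne _ _ hk, h k']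

lemma pvNodupKeys (queue_map : List (String × List String)) : (pvDict0 queue_map).keys.Nodup := by
  unfold pvDict0
  generalize hd : (PySem.Dict.empty : PySem.Dict String (List String)) = d
  have hn : d.keys.Nodup := by rw [← hd]; exact PySem.Dict.nodup_keys_empty
  clear hd
  induction queue_map generalizing d with
  | nil => exact hn
  | cons p rest ih => exact ih _ (PySem.Dict.nodup_keys_insert _ _ _ hn)

lemma pvRefold (queue_map : List (String × List String)) :
    ((pvDict0 queue_map).items.foldl (fun a p => a.insert p.1 p.2) PySem.Dict.empty) =
      pvDict0 queue_map := by
  apply PySem.Dict.ext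
  rw [PySem.Dict.items_foldl_insert_fresh (pvDict0 queue_map).items Prod.fst Prod.snd
    PySem.Dict.empty (fun a _ => PySem.Dict.contains_empty _)
    (by simpa [PySem.Dict.keys] using pvNodupKeys queue_map)]
  simp [PySem.Dict.empty]

lemma pvLowerMap_get? (queue_map : List (String × List String)) (k : String) :
    (pvLowerMap queue_map).get? k =
      ((pvDict0 queue_map).get? k).map (List.map (fun n => (n, PySem.Str.lower n))) := by
  unfold pvLowerMap
  have := pvGet?_foldl_insert_map (List.map (fun n => (n, PySem.Str.lower n)))
    (pvDict0 queue_map).items PySem.Dict.empty PySem.Dict.empty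
    (by intro k'; simp [PySem.Dict.get?_empty]) k
  rw [pvRefold] at this
  exact this

lemma pvLowerMap_getD (queue_map : List (String × List String)) (q : String) :
    (pvLowerMap queue_map).getD q [] =
      ((pvDict0 queue_map).getD q []).map (fun n => (n, PySem.Str.lower n)) := by
  rw [PySem.Dict.getD_eq_get?_getD, PySem.Dict.getD_eq_get?_getD, pvLowerMap_get?]
  cases (pvDict0 queue_map).get? q <;> simp

lemma pvEntries_eq (queue_map : List (String × List String)) (kws : List String) (q : String) :
    (((pvLowerMap queue_map).getD q []).filter
        (fun p => kws.any (fun kw => PySem.Str.isIn kw p.2))).map (fun p => q ++ ": " ++ p.1) =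
      (((pvDict0 queue_map).getD q []).filter
        (fun n => kws.any (fun kw => PySem.Str.isIn kw (PySem.Str.lower n)))).map
        (fun n => q ++ ": " ++ n) := by
  rw [pvLowerMap_getD, List.filter_map, List.map_map]
  rfl

lemma pvTopic_eq (queue_map : List (String × List String)) (kws : List String) :
    pvOuterA (pvLowerMap queue_map) kws pvQueueOrder [] PySem.Set.empty =
      (PySem.List.dedup (pvQueueOrder.flatMap (fun q =>
        (((pvDict0 queue_map).getD q []).filter
          (fun n => kws.any (fun kw => PySem.Str.isIn kw (PySem.Str.lower n)))).map
          (fun n => q ++ ": " ++ n)))).take 3 := by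
  have h0 : (PySem.Set.empty : PySem.Set String) = ([] : List String) := rfl
  rw [h0, pvOuterA_eq_absorb (pvLowerMap queue_map) kws pvQueueOrder [] (by simp),
    pvAbsorb_fst _ [] (by simp)]
  simp only [pvEntries_eq queue_map kws]
  rw [PySem.List.dedup_eq_ofList, PySem.Set.update_nil_left]

lemma pvTopicRowB_eq (d0 : PySem.Dict String (List String)) (label : String) (kws : List String) :
    pvTopicRowB d0 label kws =
      (if (PySem.List.dedup (pvQueueOrder.flatMap (fun q =>
          ((d0.getD q []).filter
            (fun n => kws.any (fun kw => PySem.Str.isIn kw (PySem.Str.lower n)))).map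
            (fun n => q ++ ": " ++ n)))).take 3 = [] then none
       else some [("label", label), ("items", PySem.Str.join " | "
          ((PySem.List.dedup (pvQueueOrder.flatMap (fun q =>
            ((d0.getD q []).filter
              (fun n => kws.any (fun kw => PySem.Str.isIn kw (PySem.Str.lower n)))).map
              (fun n => q ++ ": " ++ n)))).take 3))]) := rfl

lemma pvRows (queue_map : List (String × List String)) :
    ∀ (l : List (String × List String)) (acc : List (List (String × String))),
      l.foldl (fun acc t =>
        let ms := pvOuterA (pvLowerMap queue_map) t.2 pvQueueOrder [] PySem.Set.empty
        if ms ≠ [] then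
          acc ++ [[("label", t.1), ("items", PySem.Str.join " | " ms)]]
        else acc) acc
      = acc ++ l.filterMap (fun t => pvTopicRowB (pvDict0 queue_map) t.1 t.2) := by
  intro l
  induction l with
  | nil => intro acc; simp
  | cons t rest ih =>
    intro acc
    rw [List.foldl_cons, List.filterMap_cons]
    show List.foldl _ (if pvOuterA (pvLowerMap queue_map) t.2 pvQueueOrder [] PySem.Set.empty ≠ [] then
        acc ++ [[("label", t.1), ("items", PySem.Str.join " | "
          (pvOuterA (pvLowerMap queue_map) t.2 pvQueueOrder [] PySem.Set.empty))]]
      else acc) rest = _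
    rw [pvTopic_eq queue_map t.2, pvTopicRowB_eq]
    by_cases hM : (PySem.List.dedup (pvQueueOrder.flatMap (fun q =>
        (((pvDict0 queue_map).getD q []).filter
          (fun n => t.2.any (fun kw => PySem.Str.isIn kw (PySem.Str.lower n)))).map
          (fun n => q ++ ": " ++ n)))).take 3 = []
    · rw [if_neg (not_not_intro hM), if_pos hM, ih acc]
    · rw [if_pos hM, if_neg hM, ih (acc ++ _), List.append_assoc]
      rfl

-- ===== VERDICT (by name: the statement is the Claim_ definition above) =====
theorem collect_focus_matches_py_spec : Claim_equal_collect_focus_matches_py := by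
  intro queue_map _
  unfold Spec_collect_focus_matches_py collect_focus_matches_py collect_focus_matches_py_alt
  rw [pvRows queue_map pvFocusTopics []]
  simp
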